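-- pv_equiv track=rewrite | github.com/dhyeysanghvi15/detection-pack-lab | harness/artifacts.py | _extract_tactic
-- ===== SOURCE A (Python) =====
-- from typing import Any, Dict, List, Optional, Tuple
--
-- TACTIC_DISPLAY: Dict[str, str] = {
--     "attack.persistence": "Persistence",
--     "attack.privilege_escalation": "Privilege Escalation",
--     "attack.credential_access": "Credential Access",
--     "attack.defense_evasion": "Defense Evasion",
--     "attack.exfiltration": "Exfiltration",
--     "attack.initial_access": "Initial Access",
-- }
--
-- def _extract_tactic(tags: List[str]) -> str:
--     for t in tags:
--         if t in TACTIC_DISPLAY: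
--             return TACTIC_DISPLAY[t]
--     for t in tags:
--         if t.startswith("attack.") and not t.startswith("attack.t"):
--             return t.replace("attack.", "").replace("_", " ").title()
--     return "Uncategorized"
-- ===== SOURCE B (Python) =====
-- from typing import Dict, List, Optional
--
-- TACTIC_DISPLAY: Dict[str, str] = {
--     "attack.persistence": "Persistence",
--     "attack.privilege_escalation": "Privilege Escalation",
--     "attack.credential_access": "Credential Access",
--     "attack.defense_evasion": "Defense Evasion",
--     "attack.exfiltration": "Exfiltration",
--     "attack.initial_access": "Initial Access",
-- }
--
-- def _extract_tactic(tags: List[str]) -> str: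
--     fallback: Optional[str] = None
--     for t in tags:
--         disp = TACTIC_DISPLAY.get(t)
--         if disp is not None:
--             return disp
--         if fallback is None and t.startswith("attack.") and not t.startswith("attack.t"):
--             fallback = t.replace("attack.", "").replace("_", " ").title()
--     return fallback if fallback is not None else "Uncategorized"
-- ===== Notes on version B (the rewrite author's own statement) =====
-- stated objective: alternative
-- what changed: Replaces A's two sequential scans over tags with a single pass that returns exact dictionary matches immediately and records only the first prefix match in an Optional fallback used after the loop.
import Mathlib
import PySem

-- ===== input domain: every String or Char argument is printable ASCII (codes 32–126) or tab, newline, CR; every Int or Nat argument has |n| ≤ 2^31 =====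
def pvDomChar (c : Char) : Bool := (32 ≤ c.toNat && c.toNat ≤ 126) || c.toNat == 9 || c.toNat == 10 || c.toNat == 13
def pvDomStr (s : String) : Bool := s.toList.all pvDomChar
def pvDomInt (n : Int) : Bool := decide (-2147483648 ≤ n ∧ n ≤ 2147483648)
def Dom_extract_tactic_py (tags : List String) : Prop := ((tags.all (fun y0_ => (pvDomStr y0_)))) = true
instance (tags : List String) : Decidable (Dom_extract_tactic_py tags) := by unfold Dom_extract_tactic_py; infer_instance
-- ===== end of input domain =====

-- B folds A's two scans into one pass with an Optional fallback (alternative decomposition, same cost).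


-- ===== PORT A =====
-- the module constant TACTIC_DISPLAY (a dict)
def TACTIC_DISPLAY : PySem.Dict String String :=
  PySem.Dict.ofList [("attack.persistence", "Persistence"),
                     ("attack.privilege_escalation", "Privilege Escalation"),
                     ("attack.credential_access", "Credential Access"),
                     ("attack.defense_evasion", "Defense Evasion"),
                     ("attack.exfiltration", "Exfiltration"),
                     ("attack.initial_access", "Initial Access")]

-- str.title() on ASCII: a letter is uppercased after a non-letter, lowercased after a letter
-- (exact for the printable-ASCII domain, where 'cased' = isAlpha)
def pyTitleChars : List Char → Bool → List Char
  | [], _ => []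
  | c :: r, prevAlpha =>
      (if c.isAlpha then (if prevAlpha then c.toLower else c.toUpper) else c)
        :: pyTitleChars r c.isAlpha

def pyTitle (s : String) : String := String.ofList (pyTitleChars s.toList false)

-- t.replace("attack.", "").replace("_", " ").title()
def fmtTag (t : String) : String :=
  pyTitle (PySem.Str.replace (PySem.Str.replace t "attack." "") "_" " ")

-- first loop of A: first exact TACTIC_DISPLAY hit
def aLoop1 : List String → Option String
  | [] => none
  | t :: r => match TACTIC_DISPLAY.get? t with
      | some d => some d
      | none => aLoop1 r

-- second loop of A: first prefix match, formatted
def aLoop2 : List String → String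
  | [] => "Uncategorized"
  | t :: r =>
      if PySem.Str.startswith t "attack." && !PySem.Str.startswith t "attack.t" then fmtTag t
      else aLoop2 r

def extract_tactic_py (tags : List String) : String :=
  match aLoop1 tags with
  | some d => d
  | none => aLoop2 tags

-- ===== PORT B =====
-- single pass: return exact matches immediately, record the first prefix match as fallback
def bLoop : List String → Option String → String
  | [], fb => fb.getD "Uncategorized"
  | t :: r, fb => match TACTIC_DISPLAY.get? t with
      | some d => d
      | none =>
          if fb.isNone && PySem.Str.startswith t "attack." && !PySem.Str.startswith t "attack.t" then
            bLoop r (some (fmtTag t))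
          else bLoop r fb

def extract_tactic_py_alt (tags : List String) : String := bLoop tags none

-- ===== PRECONDITION & SPEC =====
def Spec_extract_tactic_py (tags : List String) (out : String) : Prop := out = extract_tactic_py_alt tags
instance (tags : List String) (out : String) : Decidable (Spec_extract_tactic_py tags out) := by unfold Spec_extract_tactic_py; infer_instance

-- ===== CLAIM (what is proved, stated in full; the proofs are below) =====
def Claim_equal_extract_tactic_py : Prop := ∀ (tags : List String), Dom_extract_tactic_py tags → Spec_extract_tactic_py tags (extract_tactic_py tags)

-- ===== LEMMAS AND PROOFS =====
-- invariant of B's single pass: an exact match anywhere still wins; the fallback,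
-- once set, stands in for the remainder of A's second loop
theorem bLoop_eq (tags : List String) (fb : Option String) :
    bLoop tags fb =
      match aLoop1 tags with
      | some d => d
      | none => match fb with
        | some s => s
        | none => aLoop2 tags := by
  induction tags generalizing fb with
  | nil => cases fb <;> simp [bLoop, aLoop1, aLoop2]
  | cons t r ih =>
    simp only [bLoop, aLoop1, aLoop2]
    cases h : TACTIC_DISPLAY.get? t with
    | some d => simp
    | none =>
      cases fb with
      | some s => simp [ih]
      | none =>
        simp only [ih, Option.isNone_none, Bool.true_and]
        split_ifs <;> cases aLoop1 r <;> simp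

-- ===== VERDICT (by name: the statement is the Claim_ definition above) =====
theorem extract_tactic_py_spec : Claim_equal_extract_tactic_py := by
  intro tags _
  unfold Spec_extract_tactic_py extract_tactic_py extract_tactic_py_alt
  rw [bLoop_eq]
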